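-- pv_equiv track=rewrite | github.com/Radcliffe/OEIS-Python | src/oeispy/A356/A356291.py | A356291_list
-- ===== SOURCE A (Python) =====
-- def A356291_list(size: int):
--     F, R, C = 1, [0], [1] + [0] * (size - 1)
--     for n in range(1, size):
--         F *= n
--         for k in range(n, 0, -1):
--             C[k] = C[k - 1] * k
--         C[0] = -sum(C[k] for k in range(1, n + 1))
--         R.append(F + C[0])
--     return R
-- ===== SOURCE B (Python) =====
-- def A356291_list(size: int):
--     # A356291(n) = n! - f(n) for n >= 1, where f(n) is the number of indecomposable
--     # permutations of [n] (A003319).  Classifying permutations by their leftmost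
--     # indecomposable prefix (of length k, whose last point of the prefix can be
--     # marked in k ways in the standard bijection) gives the positive recurrence
--     #     f(n) = sum(k * f(k) * (n-1-k)! for k in 1..n-1),  f(1) = 1,
--     # so no inclusion-exclusion sum over factorials of the result sequence is needed.
--     # g keeps the addends k*f(k)*(n-1-k)! with the factorial part raised as n grows.
--     R = [0]
--     fact = 1
--     g = []
--     for n in range(1, size):
--         fact *= n
--         for j in range(len(g) - 1):
--             g[j] *= n - 2 - j
--         fn = sum(g) if g else 1
--         R.append(fact - fn)
--         g.append(n * fn)
--     return R
-- ===== Notes on version B (the rewrite author's own statement) =====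
-- stated objective: alternative
-- what changed: B replaces A's inclusion-exclusion recurrence (rolling array C[k]=k!*a(n-k), new term = minus its sum, result n!+a(n)) by counting indecomposable permutations with the positive positional identity f(n) = sum(k*f(k)*(n-1-k)!, k=1..n-1) and returning n! - f(n); the maintained addends, the weights, the sign structure and the appended cell (n*f(n), not the new sum) all differ.
import Mathlib
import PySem

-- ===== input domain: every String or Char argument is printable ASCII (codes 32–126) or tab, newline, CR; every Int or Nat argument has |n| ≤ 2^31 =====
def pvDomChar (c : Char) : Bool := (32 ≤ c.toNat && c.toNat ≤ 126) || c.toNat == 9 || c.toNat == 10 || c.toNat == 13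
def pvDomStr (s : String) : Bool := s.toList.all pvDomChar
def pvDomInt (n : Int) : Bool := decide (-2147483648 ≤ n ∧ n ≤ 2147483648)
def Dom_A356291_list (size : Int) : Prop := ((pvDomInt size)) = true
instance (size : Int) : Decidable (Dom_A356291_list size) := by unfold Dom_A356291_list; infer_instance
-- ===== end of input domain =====

-- B counts indecomposable permutations f(n) by the positive positional recurrence
-- f(n) = Σ_{k=1}^{n-1} k·f(k)·(n-1-k)! and returns n! − f(n), instead of A's negated
-- inclusion-exclusion convolution; objective: alternative algorithm, same asymptotic cost.

-- ===== PORT A =====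
-- 'for k in range(n, 0, -1): C[k] = C[k-1]*k' (k = n down to 1; all indices provably in
-- range on every reachable state, so Nat-indexed set/getD is exact here)
def A356291_innerA : Nat → List Int → List Int
  | 0, C => C
  | k + 1, C => A356291_innerA k (C.set (k + 1) (C.getD k 0 * ((k : Int) + 1)))

-- 'sum(C[k] for k in range(1, n + 1))'
def A356291_sumA : Nat → List Int → Int
  | 0, _ => 0
  | k + 1, C => A356291_sumA k C + C.getD (k + 1) 0

-- 'for n in range(1, size)' with state (F, R, C); first arg = remaining iteration count
def A356291_outerA : Nat → Nat → Int → List Int → List Int → Int × List Int × List Int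
  | 0, _, F, R, C => (F, R, C)
  | m + 1, n, F, R, C =>
    let F' := F * (n : Int)
    let C1 := A356291_innerA n C
    let C2 := C1.set 0 (-(A356291_sumA n C1))
    A356291_outerA m (n + 1) F' (R ++ [F' + C2.getD 0 0]) C2

def A356291_list (size : Int) : List Int :=
  (A356291_outerA (size - 1).toNat 1 1 [0] (1 :: List.replicate (size - 1).toNat 0)).2.1

-- ===== PORT B =====
-- 'for j in range(len(g) - 1): g[j] *= n - 2 - j' (state g, remaining count, next index j;
-- every index is provably in range on reachable states, so Nat-indexed set/getD is exact)
def A356291_updG (n : Nat) : Nat → Nat → List Int → List Int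
  | 0, _, g => g
  | m + 1, j, g => A356291_updG n m (j + 1) (g.set j (g.getD j 0 * ((n : Int) - 2 - (j : Int))))

-- 'for n in range(1, size)' with state (fact, R, g); first arg = remaining iteration count
def A356291_outerB : Nat → Nat → Int → List Int → List Int → Int × List Int × List Int
  | 0, _, fact, R, g => (fact, R, g)
  | m + 1, n, fact, R, g =>
    let fact' := fact * (n : Int)
    let g1 := A356291_updG n (g.length - 1) 0 g
    let fn := if g1 = [] then 1 else g1.sum
    A356291_outerB m (n + 1) fact' (R ++ [fact' - fn]) (g1 ++ [(n : Int) * fn])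

def A356291_list_alt (size : Int) : List Int :=
  (A356291_outerB (size - 1).toNat 1 1 [0] []).2.1

-- ===== PRECONDITION & SPEC =====
def Spec_A356291_list (size : Int) (out : List Int) : Prop := out = A356291_list_alt size
instance (size : Int) (out : List Int) : Decidable (Spec_A356291_list size out) := by unfold Spec_A356291_list; infer_instance

-- ===== CLAIM (what is proved, stated in full; the proofs are below) =====
def Claim_equal_A356291_list : Prop := ∀ (size : Int), Dom_A356291_list size → Spec_A356291_list size (A356291_list size)

-- ===== LEMMAS AND PROOFS =====

-- the reference sequence a(n): convolution inverse of the factorials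
def pvFact (k : Nat) : Int := (Nat.factorial k : Int)

def pvAVals : Nat → List Int
  | 0 => [1]
  | m + 1 =>
    let p := pvAVals m
    p ++ [-(∑ k ∈ Finset.range (m + 1), pvFact (k + 1) * p.getD (m - k) 0)]

def pvA (n : Nat) : Int := (pvAVals n).getD n 0

theorem pvAVals_length (n : Nat) : (pvAVals n).length = n + 1 := by
  induction n with
  | zero => rfl
  | succ m ih => simp [pvAVals, ih]

theorem pvAVals_getD (n i : Nat) (h : i ≤ n) : (pvAVals n).getD i 0 = pvA i := by
  induction n with
  | zero => interval_cases i; rfl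
  | succ m ih =>
    rcases Nat.lt_or_ge i (m + 1) with hi | hi
    · rw [← ih (by omega)]
      simp only [pvAVals]
      rw [List.getD_eq_getElem?_getD, List.getD_eq_getElem?_getD,
        List.getElem?_append_left (by rw [pvAVals_length]; omega)]
    · have : i = m + 1 := by omega
      subst this; rfl

theorem pvA_succ (m : Nat) :
    pvA (m + 1) = -(∑ k ∈ Finset.range (m + 1), pvFact (k + 1) * pvA (m - k)) := by
  have hlen : (pvAVals m).length = m + 1 := pvAVals_length m
  show (pvAVals (m + 1)).getD (m + 1) 0 = _
  simp only [pvAVals]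
  rw [List.getD_eq_getElem?_getD, List.getElem?_append_right (by omega), hlen]
  simp only [Nat.sub_self, List.getElem?_cons_zero, Option.getD_some]
  congr 1
  refine Finset.sum_congr rfl fun k hk => ?_
  rw [pvAVals_getD m (m - k) (by omega)]

theorem pvA_zero : pvA 0 = 1 := rfl

-- ∑_{k≤m} k! a(m-k) = [m = 0]
theorem pv_star (m : Nat) :
    ∑ k ∈ Finset.range (m + 1), pvFact k * pvA (m - k) = if m = 0 then 1 else 0 := by
  cases m with
  | zero => simp [pvFact, pvA_zero, Nat.factorial]
  | succ j =>
    rw [Finset.sum_range_succ' (fun k => pvFact k * pvA (j + 1 - k)) (j + 1)]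
    have h1 : ∑ k ∈ Finset.range (j + 1), pvFact (k + 1) * pvA (j + 1 - (k + 1))
        = ∑ k ∈ Finset.range (j + 1), pvFact (k + 1) * pvA (j - k) := by
      refine Finset.sum_congr rfl fun k hk => ?_
      congr 2
      omega
    rw [h1]
    have h0 : pvFact 0 * pvA (j + 1 - 0) = pvA (j + 1) := by
      simp [pvFact, Nat.factorial]
    rw [h0, pvA_succ j]
    simp

-- ∑_{k≤m} k·k! a(m-k) = -a(m+1) - [m=0]
theorem pv_T (m : Nat) :
    ∑ k ∈ Finset.range (m + 1), (k : Int) * pvFact k * pvA (m - k)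
      = -pvA (m + 1) - (if m = 0 then 1 else 0) := by
  have hterm : ∀ k : Nat, (k : Int) * pvFact k = pvFact (k + 1) - pvFact k := by
    intro k
    simp only [pvFact, Nat.factorial_succ]
    push_cast
    ring
  calc ∑ k ∈ Finset.range (m + 1), (k : Int) * pvFact k * pvA (m - k)
      = ∑ k ∈ Finset.range (m + 1), (pvFact (k + 1) * pvA (m - k) - pvFact k * pvA (m - k)) := by
        refine Finset.sum_congr rfl fun k _ => ?_
        rw [hterm k]; ring
    _ = (∑ k ∈ Finset.range (m + 1), pvFact (k + 1) * pvA (m - k))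
        - ∑ k ∈ Finset.range (m + 1), pvFact k * pvA (m - k) := by
        rw [Finset.sum_sub_distrib]
    _ = -pvA (m + 1) - (if m = 0 then 1 else 0) := by
        rw [pv_star m, pvA_succ m]; ring

-- ∑_{k≤m} k·a(k)·(m-k)! = a(m+1) + [m=0]  (the convolution reflected, then pv_T)
theorem pv_V (m : Nat) :
    ∑ k ∈ Finset.range (m + 1), (k : Int) * pvA k * pvFact (m - k)
      = pvA (m + 1) + (if m = 0 then 1 else 0) := by
  have hrefl := Finset.sum_range_reflect (fun k => (k : Int) * pvA k * pvFact (m - k)) (m + 1)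
  have h1 : ∑ j ∈ Finset.range (m + 1),
        ((m + 1 - 1 - j : Nat) : Int) * pvA (m + 1 - 1 - j) * pvFact (m - (m + 1 - 1 - j))
      = ∑ j ∈ Finset.range (m + 1), ((m - j : Nat) : Int) * pvA (m - j) * pvFact j := by
    refine Finset.sum_congr rfl fun j hj => ?_
    have hj' : j < m + 1 := Finset.mem_range.mp hj
    have e1 : m + 1 - 1 - j = m - j := by omega
    have e2 : m - (m - j) = j := by omega
    rw [e1, e2]
  rw [h1] at hrefl
  have h2 : ∑ j ∈ Finset.range (m + 1),
        (((m - j : Nat) : Int) * pvA (m - j) * pvFact j + (j : Int) * pvFact j * pvA (m - j))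
      = ∑ j ∈ Finset.range (m + 1), (m : Int) * (pvFact j * pvA (m - j)) := by
    refine Finset.sum_congr rfl fun j hj => ?_
    have hj' : j < m + 1 := Finset.mem_range.mp hj
    have e : ((m - j : Nat) : Int) = (m : Int) - (j : Int) := by omega
    rw [e]
    ring
  rw [Finset.sum_add_distrib, hrefl] at h2
  rw [← Finset.mul_sum, pv_star m] at h2
  have hT := pv_T m
  have hm : (m : Int) * (if m = 0 then 1 else 0) = 0 := by
    cases m <;> simp
  rw [hm] at h2
  linarith

-- B's sum: Σ_{j<n-1} (j+1)·(−a(j+1))·(n-2-j)! = −a(n) for n ≥ 2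
theorem pv_fn (n : Nat) (hn : 2 ≤ n) :
    ∑ j ∈ Finset.range (n - 1), ((j : Int) + 1) * (-pvA (j + 1)) * pvFact (n - 2 - j)
      = -pvA n := by
  obtain ⟨m, rfl⟩ : ∃ m, n = m + 1 := ⟨n - 1, by omega⟩
  have hV := pv_V m
  rw [if_neg (by omega)] at hV
  rw [Finset.sum_range_succ' (fun k => (k : Int) * pvA k * pvFact (m - k)) m] at hV
  simp only [Nat.cast_zero, zero_mul] at hV
  have h1 : ∑ j ∈ Finset.range m, ((j + 1 : Nat) : Int) * pvA (j + 1) * pvFact (m - (j + 1))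
      = ∑ j ∈ Finset.range m, ((j : Int) + 1) * pvA (j + 1) * pvFact (m + 1 - 2 - j) := by
    refine Finset.sum_congr rfl fun j hj => ?_
    have e : m - (j + 1) = m + 1 - 2 - j := by omega
    rw [e]
    push_cast
    ring
  rw [h1] at hV
  have h2 : m + 1 - 1 = m := by omega
  rw [h2]
  calc ∑ j ∈ Finset.range m, ((j : Int) + 1) * (-pvA (j + 1)) * pvFact (m + 1 - 2 - j)
      = -∑ j ∈ Finset.range m, ((j : Int) + 1) * pvA (j + 1) * pvFact (m + 1 - 2 - j) := by
        rw [← Finset.sum_neg_distrib]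
        refine Finset.sum_congr rfl fun j hj => ?_
        ring
    _ = -pvA (m + 1) := by
        linarith [hV]

-- list-sum over range = Finset sum
theorem pv_listsum_range (n : Nat) (f : Nat → Int) :
    ((List.range n).map f).sum = ∑ i ∈ Finset.range n, f i := by
  induction n with
  | zero => rfl
  | succ m ih => rw [List.range_succ, List.map_append, List.sum_append, Finset.sum_range_succ, ih]; simp

-- basic getD facts
theorem pv_getD_set_ne (l : List Int) (i j : Nat) (x : Int) (h : i ≠ j) :
    (l.set i x).getD j 0 = l.getD j 0 := by
  simp [List.getD_eq_getElem?_getD, List.getElem?_set_ne h]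

theorem pv_getD_set_lt (l : List Int) (i : Nat) (x : Int) (h : i < l.length) :
    (l.set i x).getD i 0 = x := by
  simp [List.getD_eq_getElem?_getD, h]

theorem pv_getD_map_range (n j : Nat) (f : Nat → Int) (h : j < n) :
    ((List.range n).map f).getD j 0 = f j := by
  rw [List.getD_eq_getElem?_getD, List.getElem?_map]
  simp [List.getElem?_range h]

-- factorial step
theorem pv_fact_step (n : Nat) (h : 1 ≤ n) : pvFact (n - 1) * (n : Int) = pvFact n := by
  obtain ⟨j, rfl⟩ : ∃ j, n = j + 1 := ⟨n - 1, by omega⟩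
  simp only [Nat.add_sub_cancel, pvFact, Nat.factorial_succ]
  push_cast
  ring

-- ===== A-side characterization =====
theorem innerA_length (n : Nat) (C : List Int) :
    (A356291_innerA n C).length = C.length := by
  induction n generalizing C with
  | zero => rfl
  | succ n ih => simp [A356291_innerA, ih]

theorem innerA_getD (n : Nat) (C : List Int) (hn : n < C.length) (j : Nat) :
    (A356291_innerA n C).getD j 0 =
      if 1 ≤ j ∧ j ≤ n then C.getD (j - 1) 0 * (j : Int) else C.getD j 0 := by
  induction n generalizing C with
  | zero =>
    simp only [A356291_innerA]
    rw [if_neg (by omega)]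
  | succ n ih =>
    simp only [A356291_innerA]
    rw [ih _ (by simpa using Nat.lt_of_succ_lt hn)]
    rcases Nat.lt_trichotomy j (n + 1) with hj | hj | hj
    · by_cases h1 : 1 ≤ j
      · rw [if_pos ⟨h1, by omega⟩, if_pos ⟨h1, by omega⟩, pv_getD_set_ne _ _ _ _ (by omega)]
      · have hj0 : j = 0 := by omega
        subst hj0
        rw [if_neg (by omega), if_neg (by omega), pv_getD_set_ne _ _ _ _ (by omega)]
    · subst hj
      rw [if_neg (by omega), if_pos ⟨by omega, le_rfl⟩,
        pv_getD_set_lt _ _ _ (by simpa using hn)]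
      simp
    · rw [if_neg (by omega), if_neg (by omega), pv_getD_set_ne _ _ _ _ (by omega)]

theorem sumA_eq_finsetsum (j : Nat) (C : List Int) :
    A356291_sumA j C = ∑ k ∈ Finset.range j, C.getD (k + 1) 0 := by
  induction j with
  | zero => rfl
  | succ j ih => rw [A356291_sumA, ih, Finset.sum_range_succ]

theorem outerA_spec : ∀ (m n : Nat) (F : Int) (R C : List Int), 1 ≤ n →
    F = pvFact (n - 1) → n + m ≤ C.length →
    (∀ k, k < n → C.getD k 0 = pvFact k * pvA (n - 1 - k)) →
    (A356291_outerA m n F R C).2.1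
      = R ++ (List.range m).map (fun i => pvFact (n + i) + pvA (n + i)) := by
  intro m
  induction m with
  | zero => intro n F R C _ _ _ _; simp [A356291_outerA]
  | succ m ih =>
    intro n F R C hn hF hlen hinv
    subst hF
    simp only [A356291_outerA]
    have hCn : n < C.length := by omega
    have hF' : pvFact (n - 1) * (n : Int) = pvFact n := pv_fact_step n hn
    have hC1 : ∀ k, 1 ≤ k → k ≤ n →
        (A356291_innerA n C).getD k 0 = pvFact k * pvA (n - k) := by
      intro k h1 h2
      rw [innerA_getD n C hCn k, if_pos ⟨h1, h2⟩, hinv (k - 1) (by omega)]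
      have h3 : n - 1 - (k - 1) = n - k := by omega
      rw [h3]
      obtain ⟨i, rfl⟩ : ∃ i, k = i + 1 := ⟨k - 1, by omega⟩
      simp only [Nat.add_sub_cancel, pvFact, Nat.factorial_succ]
      push_cast
      ring
    have hsum : A356291_sumA n (A356291_innerA n C) = -pvA n := by
      rw [sumA_eq_finsetsum]
      have h1 : ∑ k ∈ Finset.range n, (A356291_innerA n C).getD (k + 1) 0
          = ∑ k ∈ Finset.range n, pvFact (k + 1) * pvA (n - 1 - k) := by
        refine Finset.sum_congr rfl fun k hk => ?_
        have hk' : k < n := Finset.mem_range.mp hk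
        rw [hC1 (k + 1) (by omega) (by omega)]
        congr 2
        omega
      obtain ⟨j, rfl⟩ : ∃ j, n = j + 1 := ⟨n - 1, by omega⟩
      rw [h1]
      simp only [Nat.add_sub_cancel]
      rw [pvA_succ j]
      ring
    set C2 := (A356291_innerA n C).set 0 (-(A356291_sumA n (A356291_innerA n C))) with hC2
    have hC1len : (A356291_innerA n C).length = C.length := innerA_length n C
    have hC2len : C2.length = C.length := by rw [hC2, List.length_set, hC1len]
    have hC20 : C2.getD 0 0 = pvA n := by
      rw [hC2, pv_getD_set_lt _ _ _ (by omega), hsum]; ring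
    have hout : pvFact (n - 1) * (n : Int) + C2.getD 0 0 = pvFact n + pvA n := by
      rw [hF', hC20]
    have hinv' : ∀ k, k < n + 1 → C2.getD k 0 = pvFact k * pvA ((n + 1) - 1 - k) := by
      intro k hk
      cases k with
      | zero =>
        rw [hC20]
        simp [pvFact, Nat.factorial]
      | succ j =>
        have h4 : n + 1 - 1 - (j + 1) = n - (j + 1) := by omega
        rw [hC2, pv_getD_set_ne _ _ _ _ (by omega), hC1 (j + 1) (by omega) (by omega), h4]
    have hrec := ih (n + 1) (pvFact (n - 1) * (n : Int))
      (R ++ [pvFact (n - 1) * (n : Int) + C2.getD 0 0]) C2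
      (by omega) (by simp only [Nat.add_sub_cancel]; exact hF') (by omega) hinv'
    rw [hrec, hout]
    rw [List.range_succ_eq_map, List.map_cons, List.map_map]
    simp only [Nat.add_zero, List.append_assoc, List.singleton_append]
    congr 2
    refine List.map_congr_left fun i _ => ?_
    simp only [Function.comp]
    congr 2 <;> omega

-- ===== B-side characterization =====
theorem updG_length (n : Nat) : ∀ (m j : Nat) (g : List Int),
    (A356291_updG n m j g).length = g.length := by
  intro m
  induction m with
  | zero => intro j g; rfl
  | succ m ih => intro j g; simp [A356291_updG, ih]

theorem updG_getD (n : Nat) : ∀ (m j : Nat) (g : List Int), j + m ≤ g.length → ∀ i : Nat,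
    (A356291_updG n m j g).getD i 0 =
      if j ≤ i ∧ i < j + m then g.getD i 0 * ((n : Int) - 2 - (i : Int)) else g.getD i 0 := by
  intro m
  induction m with
  | zero =>
    intro j g _ i
    simp only [A356291_updG]
    rw [if_neg (by omega)]
  | succ m ih =>
    intro j g hlen i
    simp only [A356291_updG]
    rw [ih (j + 1) _ (by simp; omega) i]
    rcases Nat.lt_trichotomy i j with hij | hij | hij
    · rw [if_neg (by omega), if_neg (by omega), pv_getD_set_ne _ _ _ _ (by omega)]
    · subst hij
      rw [if_neg (by omega), if_pos ⟨le_rfl, by omega⟩, pv_getD_set_lt _ _ _ (by omega)]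
    · by_cases h2 : i < j + (m + 1)
      · rw [if_pos ⟨by omega, by omega⟩, if_pos ⟨by omega, by omega⟩,
          pv_getD_set_ne _ _ _ _ (by omega)]
      · rw [if_neg (by omega), if_neg (by omega), pv_getD_set_ne _ _ _ _ (by omega)]

-- invariant: entering iteration n, g holds the addends (i+1)·f(i+1)·(n-3-i)!
-- (the cell appended last iteration not yet raised; Nat subtraction truncates exactly there)
theorem outerB_spec : ∀ (m n : Nat) (fact : Int) (R : List Int), 1 ≤ n →
    fact = pvFact (n - 1) →
    (A356291_outerB m n fact R
        ((List.range (n - 1)).map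
          (fun (i : Nat) => ((i : Int) + 1) * (-pvA (i + 1)) * pvFact (n - 3 - i)))).2.1
      = R ++ (List.range m).map (fun i => pvFact (n + i) + pvA (n + i)) := by
  intro m
  induction m with
  | zero => intro n fact R _ _; simp [A356291_outerB]
  | succ m ih =>
    intro n fact R hn hF
    subst hF
    simp only [A356291_outerB]
    have hF' : pvFact (n - 1) * (n : Int) = pvFact n := pv_fact_step n hn
    obtain ⟨j, rfl⟩ : ∃ j, n = j + 1 := ⟨n - 1, by omega⟩
    set gIn := (List.range (j + 1 - 1)).map
      (fun (i : Nat) => ((i : Int) + 1) * (-pvA (i + 1)) * pvFact (j + 1 - 3 - i)) with hgIn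
    have hglen : gIn.length = j := by rw [hgIn]; simp
    set g1 := A356291_updG (j + 1) (gIn.length - 1) 0 gIn with hg1def
    have hg1len : g1.length = j := by rw [hg1def, updG_length, hglen]
    have hg1 : g1 = (List.range j).map
        (fun (i : Nat) => ((i : Int) + 1) * (-pvA (i + 1)) * pvFact (j - 1 - i)) := by
      apply List.ext_getElem (by simp [hg1len])
      intro i hi1 hi2
      have hij : i < j := by rwa [hg1len] at hi1
      rw [← List.getD_eq_getElem g1 0 hi1, ← List.getD_eq_getElem _ 0 hi2,
        pv_getD_map_range _ _ _ hij, hg1def,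
        updG_getD (j + 1) (gIn.length - 1) 0 gIn (by omega) i]
      have hgval : gIn.getD i 0 = ((i : Int) + 1) * (-pvA (i + 1)) * pvFact (j + 1 - 3 - i) := by
        rw [hgIn, pv_getD_map_range _ _ _ (by omega)]
      rw [hgval, hglen]
      split_ifs with hcase
      · have e1 : j - 1 - i = (j + 1 - 3 - i) + 1 := by omega
        have e2 : ((j + 1 : Nat) : Int) - 2 - (i : Int) = (((j + 1 - 3 - i) + 1 : Nat) : Int) := by
          omega
        rw [e1, e2]
        simp only [pvFact, Nat.factorial_succ]
        push_cast
        ring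
      · have e : j + 1 - 3 - i = j - 1 - i := by omega
        rw [e]
    have hfn : (if g1 = [] then (1 : Int) else g1.sum) = -pvA (j + 1) := by
      rcases Nat.eq_zero_or_pos j with hj0 | hjpos
      · have hnil : g1 = [] := List.eq_nil_of_length_eq_zero (by omega)
        rw [if_pos hnil]
        subst hj0
        rw [pvA_succ 0]
        simp [pvFact, Nat.factorial, pvA_zero]
      · have hnnil : g1 ≠ [] := by
          intro h
          rw [h] at hg1len
          simp at hg1len
          omega
        rw [if_neg hnnil, hg1, pv_listsum_range]
        have hfneq := pv_fn (j + 1) (by omega)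
        simp only [Nat.add_sub_cancel] at hfneq
        rw [← hfneq]
        refine Finset.sum_congr rfl fun i hi => ?_
        have e : j - 1 - i = j + 1 - 2 - i := by omega
        rw [e]
    have hout : pvFact (j + 1 - 1) * ((j + 1 : Nat) : Int) - (if g1 = [] then (1 : Int) else g1.sum)
        = pvFact (j + 1) + pvA (j + 1) := by
      rw [hfn, hF']
      ring
    have hnext : g1 ++ [((j + 1 : Nat) : Int) * (if g1 = [] then (1 : Int) else g1.sum)]
        = (List.range (j + 2 - 1)).map
            (fun (i : Nat) => ((i : Int) + 1) * (-pvA (i + 1)) * pvFact (j + 2 - 3 - i)) := by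
      rw [hfn, hg1]
      have h2 : j + 2 - 1 = j + 1 := by omega
      rw [h2, List.range_succ, List.map_append]
      congr 1
      · simp only [List.map_cons, List.map_nil]
        have e : j + 2 - 3 - j = 0 := by omega
        have e2 : pvFact 0 = 1 := by simp [pvFact, Nat.factorial]
        rw [e, e2, mul_one]
        congr 1
    have hrec := ih (j + 2) (pvFact (j + 1 - 1) * ((j + 1 : Nat) : Int))
      (R ++ [pvFact (j + 1) + pvA (j + 1)])
      (by omega) (by simp only [Nat.add_sub_cancel]; exact hF')
    rw [hout, hnext, hrec]
    rw [List.range_succ_eq_map, List.map_cons, List.map_map]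
    simp only [Nat.add_zero, List.append_assoc, List.singleton_append]
    congr 2
    refine List.map_congr_left fun i _ => ?_
    simp only [Function.comp]
    congr 2 <;> omega

-- ===== assembly =====
theorem listA_char (m : Nat) :
    (A356291_outerA m 1 1 [0] (1 :: List.replicate m 0)).2.1
      = [0] ++ (List.range m).map (fun i => pvFact (1 + i) + pvA (1 + i)) := by
  have h1 : (1 : Int) = pvFact 0 := by simp [pvFact, Nat.factorial]
  have := outerA_spec m 1 1 [0] (1 :: List.replicate m 0) (by omega)
    (by simp [pvFact, Nat.factorial])
    (by simp only [List.length_cons, List.length_replicate]; omega) (by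
      intro k hk
      interval_cases k
      simp [pvFact, Nat.factorial, pvA_zero])
  simpa using this

theorem listB_char (m : Nat) :
    (A356291_outerB m 1 1 [0] []).2.1
      = [0] ++ (List.range m).map (fun i => pvFact (1 + i) + pvA (1 + i)) := by
  have h := outerB_spec m 1 1 [0] (by omega) (by simp [pvFact, Nat.factorial])
  simpa using h

-- ===== VERDICT (by name: the statement is the Claim_ definition above) =====
theorem A356291_list_spec : Claim_equal_A356291_list := by
  intro size _
  unfold Spec_A356291_list A356291_list A356291_list_alt
  rw [listA_char, listB_char]
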